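-- pv_equiv track=rewrite | github.com/stranac/Advent-of-Code | day01/day01.py | enters_basement
-- ===== SOURCE A (Python) =====
-- def enters_basement(instructions):
--     """Find the first instruction that makes Santa enter the basement.
--
--     Args:
--       instructions (string): Santa's movement instructions.
--         '(' means go up, ')' means go down.
--
--     Returns:
--       int: Position of the first instruction at which Santa enter the basement
--
--     Examples:
--       >>> enters_basement(')')
--       1
--       >>> enters_basement('()())')
--       5
--
--     """
--     floor = 0
--     for i, instruction in enumerate(instructions, 1):
--         if instruction == '(':
--             floor += 1
--         else:
--             floor -= 1
--         if floor < 0: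
--             return i
-- ===== SOURCE B (Python) =====
-- def enters_basement(instructions):
--     # Two-phase: materialize the running-floor prefix sums, then search
--     # for the first position (1-based) whose floor is negative.
--     floors = []
--     floor = 0
--     for c in instructions:
--         floor += 1 if c == '(' else -1
--         floors.append(floor)
--     for i, f in enumerate(floors, 1):
--         if f < 0:
--             return i
--     return None
-- ===== Notes on version B (the rewrite author's own statement) =====
-- stated objective: alternative
-- what changed: Replaces A's single fused loop (update floor and early-return in one pass) with a two-phase decomposition: first build the full list of running-floor prefix sums, then scan it for the first negative value.
import Mathlib
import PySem

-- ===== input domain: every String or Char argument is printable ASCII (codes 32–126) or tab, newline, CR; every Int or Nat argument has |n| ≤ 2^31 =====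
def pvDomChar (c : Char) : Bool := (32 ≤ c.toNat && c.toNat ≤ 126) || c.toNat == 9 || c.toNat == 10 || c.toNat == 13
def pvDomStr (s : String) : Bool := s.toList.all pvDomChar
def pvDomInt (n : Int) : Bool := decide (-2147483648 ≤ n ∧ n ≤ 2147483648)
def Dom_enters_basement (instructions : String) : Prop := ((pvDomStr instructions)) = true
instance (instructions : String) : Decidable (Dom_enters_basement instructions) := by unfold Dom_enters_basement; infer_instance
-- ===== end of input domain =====

-- B replaces A's fused scan-and-early-return loop with a two-phase decomposition (build the running-floor prefix sums, then search for the first negative); objective: alternative, same O(n) cost.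


-- ===== PORT A =====
-- fused loop: update floor, return position as soon as floor < 0
def entersGoA : List Char → Int → Int → Option Int
  | [], _, _ => none
  | c :: rest, floor, i =>
      let floor' := if c = '(' then floor + 1 else floor - 1
      if floor' < 0 then some i else entersGoA rest floor' (i + 1)

def enters_basement (instructions : String) : Option Int :=
  entersGoA instructions.toList 0 1

-- ===== PORT B =====
-- phase 1: running-floor prefix sums
def entersFloors : List Char → Int → List Int
  | [], _ => []
  | c :: rest, floor =>
      let floor' := floor + (if c = '(' then 1 else -1)
      floor' :: entersFloors rest floor'

-- phase 2: first 1-based position with a negative floor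
def entersFindNeg : List Int → Int → Option Int
  | [], _ => none
  | f :: rest, i => if f < 0 then some i else entersFindNeg rest (i + 1)

def enters_basement_alt (instructions : String) : Option Int :=
  entersFindNeg (entersFloors instructions.toList 0) 1

-- ===== PRECONDITION & SPEC =====
def Spec_enters_basement (instructions : String) (out : Option Int) : Prop := out = enters_basement_alt instructions
instance (instructions : String) (out : Option Int) : Decidable (Spec_enters_basement instructions out) := by unfold Spec_enters_basement; infer_instance

-- ===== CLAIM (what is proved, stated in full; the proofs are below) =====
def Claim_equal_enters_basement : Prop := ∀ (instructions : String), Dom_enters_basement instructions → Spec_enters_basement instructions (enters_basement instructions)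

-- ===== LEMMAS AND PROOFS =====

-- proof lemma
theorem entersGoA_eq_findNeg (cs : List Char) (floor i : Int) :
    entersGoA cs floor i = entersFindNeg (entersFloors cs floor) i := by
  induction cs generalizing floor i with
  | nil => rfl
  | cons c rest ih =>
      simp only [entersGoA, entersFloors, entersFindNeg]
      by_cases h : c = '('
      · simp [h, ih]
      · simp [h, ih, sub_eq_add_neg]

-- ===== VERDICT (by name: the statement is the Claim_ definition above) =====
theorem enters_basement_spec : Claim_equal_enters_basement := by
  intro s _
  unfold Spec_enters_basement enters_basement enters_basement_alt
  exact entersGoA_eq_findNeg _ _ _
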